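-- pv_equiv track=rewrite | github.com/joe-molitoris/Advent-of-Code | 2015/Day 3/Solution.py | santa_robosanta
-- ===== SOURCE A (Python) =====
-- def santa_robosanta(directions:str) -> int:
--     santa_x,santa_y = 0,0
--     robo_x,robo_y = 0,0
--     santa_houses, robo_houses = [(santa_x,santa_y)], [(robo_x,robo_y)]
--     decode = {"^":1, "v":-1, "<":-1, ">":1}
--     for x,i in enumerate(directions, start=0):
--         if x%2==0:
--             if i in ["^", "v"]:
--                 santa_y+=decode[i]
--                 santa_houses += [(santa_x,santa_y)]
--             else:
--                 santa_x+=decode[i]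
--                 santa_houses += [(santa_x,santa_y)]
--         else:
--             if i in ["^", "v"]:
--                 robo_y+=decode[i]
--                 robo_houses += [(robo_x,robo_y)]
--             else:
--                 robo_x+=decode[i]
--                 robo_houses += [(robo_x,robo_y)]
--     return len(set(santa_houses+robo_houses))
-- ===== SOURCE B (Python) =====
-- def santa_robosanta(directions: str) -> int:
--     delta = {"^": (0, 1), "v": (0, -1), "<": (-1, 0), ">": (1, 0)}
--
--     def walk(chars):
--         x, y = 0, 0
--         seen = {(0, 0)}
--         for c in chars:
--             dx, dy = delta[c]
--             x += dx
--             y += dy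
--             seen.add((x, y))
--         return seen
--
--     return len(walk(directions[0::2]) | walk(directions[1::2]))
-- ===== Notes on version B (the rewrite author's own statement) =====
-- stated objective: alternative
-- what changed: Instead of one interleaved loop that tests the index parity at every step and collects duplicate-laden position lists deduplicated at the end, B splits the input into the two step-2 subsequences, walks each agent independently accumulating its positions directly into a set, and returns the size of the union of the two sets.
import Mathlib
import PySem

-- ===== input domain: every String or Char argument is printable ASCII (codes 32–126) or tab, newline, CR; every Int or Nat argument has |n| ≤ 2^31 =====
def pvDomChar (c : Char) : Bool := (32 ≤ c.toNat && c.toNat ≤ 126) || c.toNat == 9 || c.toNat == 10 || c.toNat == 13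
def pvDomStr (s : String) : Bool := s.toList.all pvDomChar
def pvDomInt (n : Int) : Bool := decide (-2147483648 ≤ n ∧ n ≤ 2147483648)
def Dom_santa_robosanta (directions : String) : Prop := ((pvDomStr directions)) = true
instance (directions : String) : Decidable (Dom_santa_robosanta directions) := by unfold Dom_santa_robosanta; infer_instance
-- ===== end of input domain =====

-- B re-decomposes A's interleaved parity-tested walk into two independent walks over the
-- step-2 subsequences, accumulating into sets and taking the union (alternative decomposition,
-- same cost); equal return value on every input made only of '^' 'v' '<' '>' (elsewhere both raise KeyError).

-- ===== PORT A =====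
-- decode = {"^":1, "v":-1, "<":-1, ">":1}; decode[i] is total (getD 0) only under Pre_ (KeyError excluded)
def pvDecodeA : PySem.Dict Char Int := PySem.Dict.ofList [('^', 1), ('v', -1), ('<', -1), ('>', 1)]

-- one iteration of A's 'for x,i in enumerate(directions)' loop; state (sx, sy, rx, ry, santa_houses, robo_houses)
def pvStepA (st : Int × Int × Int × Int × List (Int × Int) × List (Int × Int)) (p : Int × Char) :
    Int × Int × Int × Int × List (Int × Int) × List (Int × Int) :=
  let (sx, sy, rx, ry, sh, rh) := st
  let (x, i) := p
  if PySem.Int.mod x 2 = 0 then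
    if i = '^' ∨ i = 'v' then
      (sx, sy + pvDecodeA.getD i 0, rx, ry, sh ++ [(sx, sy + pvDecodeA.getD i 0)], rh)
    else
      (sx + pvDecodeA.getD i 0, sy, rx, ry, sh ++ [(sx + pvDecodeA.getD i 0, sy)], rh)
  else
    if i = '^' ∨ i = 'v' then
      (sx, sy, rx, ry + pvDecodeA.getD i 0, sh, rh ++ [(rx, ry + pvDecodeA.getD i 0)])
    else
      (sx, sy, rx + pvDecodeA.getD i 0, ry, sh, rh ++ [(rx + pvDecodeA.getD i 0, ry)])

def santa_robosanta (directions : String) : Int :=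
  let st := (PySem.List.enumerate directions.toList 0).foldl pvStepA
              (0, 0, 0, 0, [((0 : Int), (0 : Int))], [((0 : Int), (0 : Int))])
  PySem.Set.len (PySem.Set.ofList (st.2.2.2.2.1 ++ st.2.2.2.2.2))

-- ===== PORT B =====
-- delta = {'^':(0,1), 'v':(0,-1), '<':(-1,0), '>':(1,0)}; delta[c] total (getD (0,0)) only under Pre_
def pvDeltaB : PySem.Dict Char (Int × Int) :=
  PySem.Dict.ofList [('^', (0, 1)), ('v', (0, -1)), ('<', (-1, 0)), ('>', (1, 0))]

-- hand port of the step-2 slices directions[0::2] / directions[1::2] (exact: chars at even / odd indices, in order)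
mutual
  def pvEvens : List Char → List Char
    | [] => []
    | c :: cs => c :: pvOdds cs
  def pvOdds : List Char → List Char
    | [] => []
    | _ :: cs => pvEvens cs
end

-- Source B's walk(chars): x,y = 0,0; seen = {(0,0)}; for c: dx,dy = delta[c]; x += dx; y += dy; seen.add((x,y))
def pvWalkB (chars : List Char) : PySem.Set (Int × Int) :=
  (chars.foldl
      (fun (st : (Int × Int) × PySem.Set (Int × Int)) c =>
        let d := pvDeltaB.getD c (0, 0)
        let p := (st.1.1 + d.1, st.1.2 + d.2)
        (p, PySem.Set.add st.2 p))
      ((0, 0), PySem.Set.ofList [((0 : Int), (0 : Int))])).2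

def santa_robosanta_alt (directions : String) : Int :=
  PySem.Set.len (PySem.Set.union (pvWalkB (pvEvens directions.toList)) (pvWalkB (pvOdds directions.toList)))

-- ===== PRECONDITION & SPEC =====
-- Pre_ excludes exactly the inputs containing a character other than '^' 'v' '<' '>',
-- on which A (decode[i]) raises KeyError (B raises KeyError there too).
def Pre_santa_robosanta (directions : String) : Prop :=
  directions.toList.all (fun c => c == '^' || c == 'v' || c == '<' || c == '>') = true
instance (directions : String) : Decidable (Pre_santa_robosanta directions) := by
  unfold Pre_santa_robosanta; infer_instance

def pvWitness_santa_robosanta : String := "^^v<>v"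

def Spec_santa_robosanta (directions : String) (out : Int) : Prop := out = santa_robosanta_alt directions
instance (directions : String) (out : Int) : Decidable (Spec_santa_robosanta directions out) := by
  unfold Spec_santa_robosanta; infer_instance

-- ===== CLAIM (what is proved, stated in full; the proofs are below) =====
def Claim_equal_santa_robosanta : Prop := ∀ (directions : String), Dom_santa_robosanta directions → Pre_santa_robosanta directions → Spec_santa_robosanta directions (santa_robosanta directions)

-- ===== LEMMAS AND PROOFS =====

-- positions visited, in order, by a walker starting at (x, y) and following chars (spec of both walks)
def pvTrail (chars : List Char) (x y : Int) : List (Int × Int) :=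
  match chars with
  | [] => []
  | c :: cs =>
    let d := pvDeltaB.getD c (0, 0)
    (x + d.1, y + d.2) :: pvTrail cs (x + d.1) (y + d.2)

-- B's fold adds exactly the trail positions, in order
theorem pvWalkB_fold (chars : List Char) (x y : Int) (s : PySem.Set (Int × Int)) :
    (chars.foldl
        (fun (st : (Int × Int) × PySem.Set (Int × Int)) c =>
          let d := pvDeltaB.getD c (0, 0)
          let p := (st.1.1 + d.1, st.1.2 + d.2)
          (p, PySem.Set.add st.2 p))
        ((x, y), s)).2 = PySem.Set.update s (pvTrail chars x y) := by
  induction chars generalizing x y s with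
  | nil => simp [pvTrail, PySem.Set.update]
  | cons c cs ih => simp [pvTrail, PySem.Set.update_cons, ih]

theorem pvWalkB_eq (chars : List Char) :
    pvWalkB chars = PySem.Set.ofList ((0, 0) :: pvTrail chars 0 0) := by
  have h0 : PySem.Set.ofList ((0, 0) :: pvTrail chars 0 0)
      = PySem.Set.update (PySem.Set.ofList [((0 : Int), (0 : Int))]) (pvTrail chars 0 0) := by
    simp [PySem.Set.ofList, PySem.Set.update, List.foldl, PySem.Set.add]
  rw [pvWalkB, pvWalkB_fold, h0]

-- evaluation of the two literal dicts on the four valid characters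
theorem pvDec1 : pvDecodeA.getD '^' 0 = 1 := by decide
theorem pvDec2 : pvDecodeA.getD 'v' 0 = -1 := by decide
theorem pvDec3 : pvDecodeA.getD '<' 0 = -1 := by decide
theorem pvDec4 : pvDecodeA.getD '>' 0 = 1 := by decide
theorem pvDel1 : pvDeltaB.getD '^' (0, 0) = (0, 1) := by decide
theorem pvDel2 : pvDeltaB.getD 'v' (0, 0) = (0, -1) := by decide
theorem pvDel3 : pvDeltaB.getD '<' (0, 0) = (-1, 0) := by decide
theorem pvDel4 : pvDeltaB.getD '>' (0, 0) = (1, 0) := by decide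

-- A's interleaved loop splits into the two independent trails: starting at index k,
-- the relative-even characters drive one agent and the relative-odd ones the other.
theorem pvFoldA_split (cs : List Char) (k : Nat)
    (hv : ∀ c ∈ cs, c = '^' ∨ c = 'v' ∨ c = '<' ∨ c = '>') :
    ∀ (sx sy rx ry : Int) (sh rh : List (Int × Int)),
    ((PySem.List.enumerate cs (k : Int)).foldl pvStepA (sx, sy, rx, ry, sh, rh)).2.2.2.2 =
      if k % 2 = 0 then
        (sh ++ pvTrail (pvEvens cs) sx sy, rh ++ pvTrail (pvOdds cs) rx ry)
      else
        (sh ++ pvTrail (pvOdds cs) sx sy, rh ++ pvTrail (pvEvens cs) rx ry) := by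
  induction cs generalizing k with
  | nil => intro sx sy rx ry sh rh; simp [PySem.List.enumerate_nil, pvEvens, pvOdds, pvTrail]
  | cons c cs ih =>
    intro sx sy rx ry sh rh
    have hc := hv c (by simp)
    have hv' : ∀ c' ∈ cs, c' = '^' ∨ c' = 'v' ∨ c' = '<' ∨ c' = '>' := fun c' h => hv c' (by simp [h])
    have ih' := ih (k + 1) hv'
    push_cast at ih'
    rw [PySem.List.enumerate_cons]
    simp only [List.foldl_cons]
    rcases Nat.even_or_odd k with he | ho
    · have hk0 : k % 2 = 0 := Nat.even_iff.mp he
      have hk1' : (k + 1) % 2 = 1 := by omega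
      have hdvd : (2 : Int) ∣ (k : Int) := by omega
      rcases hc with h | h | h | h <;> subst h <;>
        simp [pvStepA, hdvd, ih', hk0, hk1', pvEvens, pvOdds, pvTrail,
          pvDec1, pvDec2, pvDec3, pvDec4, pvDel1, pvDel2, pvDel3, pvDel4]
    · have hk0 : k % 2 = 1 := Nat.odd_iff.mp ho
      have hk1' : (k + 1) % 2 = 0 := by omega
      have hdvd : ¬ (2 : Int) ∣ (k : Int) := by omega
      rcases hc with h | h | h | h <;> subst h <;>
        simp [pvStepA, hdvd, ih', hk0, hk1', pvEvens, pvOdds, pvTrail,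
          pvDec1, pvDec2, pvDec3, pvDec4, pvDel1, pvDel2, pvDel3, pvDel4]

theorem pvUpdate_ofList {a : Type} [BEq a] [LawfulBEq a] (s : PySem.Set a) (l : List a) :
    PySem.Set.update s (PySem.Set.ofList l) = PySem.Set.update s l := by
  rw [PySem.Set.update_eq_append_filter, PySem.Set.update_eq_append_filter, PySem.Set.ofList_ofList]

-- ===== VERDICT (by name: the statement is the Claim_ definition above) =====
theorem santa_robosanta_spec : Claim_equal_santa_robosanta := by
  intro s _ hpre
  show santa_robosanta s = santa_robosanta_alt s
  rw [Pre_santa_robosanta] at hpre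
  have hpre' : ∀ c ∈ s.toList, c = '^' ∨ c = 'v' ∨ c = '<' ∨ c = '>' := by
    intro c hc
    have := List.all_eq_true.mp hpre c hc
    simp only [Bool.or_eq_true, beq_iff_eq] at this
    tauto
  have hA := pvFoldA_split s.toList 0 hpre' 0 0 0 0 [(0, 0)] [(0, 0)]
  norm_num at hA
  unfold santa_robosanta santa_robosanta_alt
  simp only [hA]
  have hu : PySem.Set.union (pvWalkB (pvEvens s.toList)) (pvWalkB (pvOdds s.toList))
      = PySem.Set.update (pvWalkB (pvEvens s.toList)) (pvWalkB (pvOdds s.toList)) := rfl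
  rw [hu, pvWalkB_eq, pvWalkB_eq, pvUpdate_ofList, ← PySem.Set.ofList_append]
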